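-- pv_equiv track=rewrite | github.com/vrthra/FAlgebra | src/FAlgebra.py | remove_all_faults_except_one_from_grammar
-- ===== SOURCE A (Python) =====
-- from enum import Enum
--
-- def is_nt(symbol):
--      return symbol and (symbol[0], symbol[-1]) == ('<', '>')
--
-- def tsplit(token):
--     assert token[0], token[-1] == ('<', '>')
--     front, *back = token[1:-1].split(None, 1)
--     return front, ' '.join(back)
--
-- def stem(token):
--     return tsplit(token)[0].strip()
--
-- def refinement(token):
--     return tsplit(token)[1]
--
-- def is_refined_key(key):
--     assert is_nt(key)
--     return (' ' in key)
--
-- def is_base_key(key):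
--     return not is_refined_key(key)
--
-- def get_reachable_positions(rule, fkey, reachable):
--     positions = []
--     for i, token in enumerate(rule):
--         if not is_nt(token): continue
--         if fkey in reachable[token]:
--             positions.append(i)
--     return positions
--
-- class FKey(str, Enum):
--     #negate = 'NEGATE'
--     #fault = 'FAULT' # not used
--     atmost = 'ATMOST'
--     atleast = 'ATLEAST'
--     exactly = 'EXACTLY'
--
-- def to_fkey_prefix(name, prefix, kind):
--     #if kind == FKey.negative:
--     #    return "<%s -%s>" % (name[1:-1], prefix)
--     #if kind == FKey.fault: # not used
--     #    return "<%s F%s>" % (name[1:-1], prefix)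
--     if kind == FKey.atmost:
--         return "<%s *F%s>" % (name[1:-1], prefix)
--     elif kind == FKey.atleast:
--         return "<%s +F%s>" % (name[1:-1], prefix)
--     elif kind == FKey.exactly:
--         return "<%s .F%s>" % (name[1:-1], prefix)
--     assert False
--
-- def negate_prefix(prefix):
--     assert ' ' not in prefix
--     return 'neg(%s)' % prefix
--
-- def negate_base_key(k, prefix):
--     assert is_nt(k)
--     assert is_base_key(k)
--     return '<%s %s>' % (stem(k), negate_prefix(prefix))
--
-- def remove_all_faults_except_one_from_key(grammar, key, fsym, prefix, reachable):
--     ref = refinement(to_fkey_prefix(fsym, prefix, FKey.atleast)) # negation should be atleast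
--     rules = grammar[key]
--     my_rules = []
--     for rule in grammar[key]:
--         positions = get_reachable_positions(rule, fsym, reachable)
--         if not positions: # make it len(positions) >= n if necessary
--             # add this rule as is because we can not embed the fault here.
--             my_rules.append(rule)
--         else:
--             # skip pos for each rule
--             for pos in positions:
--                 new_rule = [to_fkey_prefix(t, prefix, FKey.atmost)
--                             if pos == p else  # at p position, there _may be_ a fault, but not in other places
--                             (negate_base_key(t, ref) if is_nt(t) else t)
--                             # change to FKey.exactly to make it exactly
--                             for p,t in enumerate(rule)]
--                 my_rules.append(new_rule)
--     return (to_fkey_prefix(key, prefix, FKey.atmost), my_rules)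
--
-- def remove_all_faults_except_one_from_grammar(grammar, fsym, prefix_f, reachable):
--     new_grammar = {}
--     for key in grammar:
--         fk, rules = remove_all_faults_except_one_from_key(grammar, key, fsym, prefix_f, reachable)
--         assert rules # there will be rules because negation is involved.
--         if fk not in new_grammar:
--             new_grammar[fk] = []
--         new_grammar[fk].extend(rules)
--     return new_grammar
-- ===== SOURCE B (Python) =====
-- from enum import Enum
--
--
-- def is_nt(symbol):
--     return symbol and (symbol[0], symbol[-1]) == ('<', '>')
--
--
-- def tsplit(token):
--     assert token[0], token[-1] == ('<', '>')
--     front, *back = token[1:-1].split(None, 1)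
--     return front, ' '.join(back)
--
--
-- def stem(token):
--     return tsplit(token)[0].strip()
--
--
-- def refinement(token):
--     return tsplit(token)[1]
--
--
-- class FKey(str, Enum):
--     atmost = 'ATMOST'
--     atleast = 'ATLEAST'
--     exactly = 'EXACTLY'
--
--
-- def to_fkey_prefix(name, prefix, kind):
--     if kind == FKey.atmost:
--         return "<%s *F%s>" % (name[1:-1], prefix)
--     elif kind == FKey.atleast:
--         return "<%s +F%s>" % (name[1:-1], prefix)
--     elif kind == FKey.exactly:
--         return "<%s .F%s>" % (name[1:-1], prefix)
--     assert False
--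
--
-- def negate_prefix(prefix):
--     assert ' ' not in prefix
--     return 'neg(%s)' % prefix
--
--
-- def negate_base_key(k, prefix):
--     assert is_nt(k)
--     assert ' ' not in k
--     return '<%s %s>' % (stem(k), negate_prefix(prefix))
--
--
-- def remove_all_faults_except_one_from_grammar(grammar, fsym, prefix_f, reachable):
--     ref = refinement(to_fkey_prefix(fsym, prefix_f, FKey.atleast))
--
--     def neg(t):
--         return negate_base_key(t, ref) if is_nt(t) else t
--
--     def variants(rule):
--         # one-hole recursion on the rule: for each reachable slot, emit the rule
--         # with that slot atmost-marked and every other nonterminal negated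
--         if not rule:
--             return []
--         t, rest = rule[0], rule[1:]
--         vs = [[neg(t)] + v for v in variants(rest)]
--         if is_nt(t) and fsym in reachable[t]:
--             vs.insert(0, [to_fkey_prefix(t, prefix_f, FKey.atmost)] + [neg(u) for u in rest])
--         return vs
--
--     new_grammar = {}
--     for key in grammar:
--         rules = grammar[key]
--         my_rules = []
--         for rule in rules:
--             vs = variants(rule)
--             my_rules.extend(vs if vs else [rule])
--         fk = to_fkey_prefix(key, prefix_f, FKey.atmost)
--         new_grammar.setdefault(fk, []).extend(my_rules)
--     return new_grammar
-- ===== Notes on version B (the rewrite author's own statement) =====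
-- stated objective: alternative
-- what changed: B drops get_reachable_positions and the per-position index-comparing full re-scan entirely: a single one-hole structural recursion over each rule emits, at every reachable slot, the atmost-patched variant and conses the negated head onto the tail's variants, so no positions list and no enumerate/index arithmetic exist in B.
import Mathlib
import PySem

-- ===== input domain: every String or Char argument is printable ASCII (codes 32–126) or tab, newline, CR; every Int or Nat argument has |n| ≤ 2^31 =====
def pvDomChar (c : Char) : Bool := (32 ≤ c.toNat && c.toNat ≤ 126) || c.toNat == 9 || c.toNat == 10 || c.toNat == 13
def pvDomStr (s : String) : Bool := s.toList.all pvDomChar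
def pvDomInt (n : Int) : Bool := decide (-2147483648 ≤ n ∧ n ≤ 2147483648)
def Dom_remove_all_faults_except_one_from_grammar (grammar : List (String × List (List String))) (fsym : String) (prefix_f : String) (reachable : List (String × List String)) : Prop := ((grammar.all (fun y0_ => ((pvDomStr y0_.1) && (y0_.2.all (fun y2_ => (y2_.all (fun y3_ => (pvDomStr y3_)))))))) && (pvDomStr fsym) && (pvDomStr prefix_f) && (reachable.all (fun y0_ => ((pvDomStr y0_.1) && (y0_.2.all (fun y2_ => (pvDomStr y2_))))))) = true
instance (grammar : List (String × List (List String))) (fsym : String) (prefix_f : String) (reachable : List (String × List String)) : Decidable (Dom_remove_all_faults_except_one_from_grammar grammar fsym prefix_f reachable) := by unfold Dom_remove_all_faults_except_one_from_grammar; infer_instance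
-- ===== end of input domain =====

-- B replaces the positions-list + per-position ternary re-scan of each rule by a
-- one-hole recursion over the rule: a single structural pass that, at each reachable
-- slot, emits the atmost-patched variant and conses the negated head onto the variants
-- of the tail (objective: alternative decomposition, same cost class).

-- ===== shared helpers (Python helpers identical in Source A and Source B) =====

-- is_nt(symbol): symbol and (symbol[0], symbol[-1]) == ('<', '>')
def pvIsNt (s : String) : Bool :=
  decide (s ≠ "") && (PySem.Str.pyGet? s 0 == some '<') && (PySem.Str.pyGet? s (-1) == some '>')

-- name[1:-1]
def pvInner (s : String) : String := PySem.Str.slice s (some 1) (some (-1))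

-- tsplit(token): front, *back = token[1:-1].split(None, 1); return front, ' '.join(back)
-- (the [] case is Python's ValueError; Pre_ keeps such tokens away from tsplit callers)
def pvTsplit (token : String) : String × String :=
  match PySem.Str.split₀Max (pvInner token) 1 with
  | [] => ("", "")
  | [f] => (f, "")
  | f :: b :: _ => (f, b)

-- stem(token) = tsplit(token)[0].strip()
def pvStem (token : String) : String := PySem.Str.strip (pvTsplit token).1

-- refinement(token) = tsplit(token)[1]
def pvRefinement (token : String) : String := (pvTsplit token).2

inductive PvFKey
  | atmost
  | atleast
  | exactly
deriving DecidableEq, Repr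

-- to_fkey_prefix(name, prefix, kind)
def pvToFkeyPrefix (name pfx : String) (kind : PvFKey) : String :=
  match kind with
  | .atmost => "<" ++ pvInner name ++ " *F" ++ pfx ++ ">"
  | .atleast => "<" ++ pvInner name ++ " +F" ++ pfx ++ ">"
  | .exactly => "<" ++ pvInner name ++ " .F" ++ pfx ++ ">"

-- negate_prefix(prefix) = 'neg(%s)' % prefix  (its "' ' not in prefix" assert is excluded by Pre_)
def pvNegatePrefix (p : String) : String := "neg(" ++ p ++ ")"

-- negate_base_key(k, prefix) = '<%s %s>' % (stem(k), negate_prefix(prefix))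
-- (its is_base_key assert is excluded by Pre_)
def pvNegateBaseKey (k ref : String) : String := "<" ++ pvStem k ++ " " ++ pvNegatePrefix ref ++ ">"

-- ===== PORT A =====

-- get_reachable_positions(rule, fkey, reachable): loop with positions.append(i)
-- (reachable[token] KeyError is excluded by Pre_, hence getD [])
def pvGetReachablePositions (rule : List String) (fkey : String) (reachable : List (String × List String)) : List Int :=
  (PySem.List.enumerate rule).foldl
    (fun acc it =>
      if pvIsNt it.2 then
        (if ((PySem.Dict.mk reachable).getD it.2 []).contains fkey then acc ++ [it.1] else acc)
      else acc) []

-- remove_all_faults_except_one_from_key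
def pvRemoveKey (grammar : List (String × List (List String))) (key fsym pfx : String) (reachable : List (String × List String)) : String × List (List String) :=
  let ref := pvRefinement (pvToFkeyPrefix fsym pfx .atleast)
  let rules := (PySem.Dict.mk grammar).getD key []
  let myRules := rules.foldl
    (fun acc rule =>
      let positions := pvGetReachablePositions rule fsym reachable
      if positions.isEmpty then acc ++ [rule]
      else acc ++ positions.map (fun pos =>
        (PySem.List.enumerate rule).map (fun pt =>
          if pos = pt.1 then pvToFkeyPrefix pt.2 pfx .atmost
          else (if pvIsNt pt.2 then pvNegateBaseKey pt.2 ref else pt.2)))) []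
  (pvToFkeyPrefix key pfx .atmost, myRules)

-- remove_all_faults_except_one_from_grammar (A): dict built with
-- 'if fk not in new_grammar: new_grammar[fk] = []' then extend
-- (the 'assert rules' is excluded by Pre_)
def remove_all_faults_except_one_from_grammar (grammar : List (String × List (List String))) (fsym : String) (prefix_f : String) (reachable : List (String × List String)) : List (String × List (List String)) :=
  (grammar.foldl
    (fun ng kv =>
      let fkRules := pvRemoveKey grammar kv.1 fsym prefix_f reachable
      let ng1 := if ng.contains fkRules.1 then ng else ng.insert fkRules.1 ([] : List (List String))
      ng1.insert fkRules.1 (ng1.getD fkRules.1 [] ++ fkRules.2))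
    (PySem.Dict.mk [])).items

-- ===== PORT B =====

-- B's neg(t): negate_base_key(t, ref) if is_nt(t) else t
def pvNeg (ref t : String) : String := if pvIsNt t then pvNegateBaseKey t ref else t

-- B's variants(rule): one-hole recursion on the rule
def pvVariants (fsym pfx ref : String) (reachable : List (String × List String)) : List String → List (List String)
  | [] => []
  | t :: rest =>
    let vs := (pvVariants fsym pfx ref reachable rest).map (fun v => pvNeg ref t :: v)
    if pvIsNt t && ((PySem.Dict.mk reachable).getD t []).contains fsym then
      (pvToFkeyPrefix t pfx .atmost :: rest.map (pvNeg ref)) :: vs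
    else vs

-- remove_all_faults_except_one_from_grammar (B, from Source B): per key, extend with
-- variants(rule) (or the rule itself when there are none), merge with setdefault
def remove_all_faults_except_one_from_grammar_alt (grammar : List (String × List (List String))) (fsym : String) (prefix_f : String) (reachable : List (String × List String)) : List (String × List (List String)) :=
  let ref := pvRefinement (pvToFkeyPrefix fsym prefix_f .atleast)
  (grammar.foldl
    (fun ng kv =>
      let myRules := ((PySem.Dict.mk grammar).getD kv.1 []).foldl
        (fun acc rule =>
          let vs := pvVariants fsym prefix_f ref reachable rule
          acc ++ (if vs.isEmpty then [rule] else vs)) []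
      let fk := pvToFkeyPrefix kv.1 prefix_f .atmost
      let ng1 := ng.setdefault fk ([] : List (List String))
      ng1.insert fk (ng1.getD fk [] ++ myRules))
    (PySem.Dict.mk [])).items

-- ===== PRECONDITION & SPEC =====

-- whitespace recognised by str.split; exact on the printable-ASCII + tab/newline/CR domain
def pvIsWs (c : Char) : Bool := c = ' ' || c = '\t' || c = '\n' || c = '\r'

-- a nonterminal token negate_base_key can handle: no space, and t[1:-1] has a non-whitespace char
def pvGoodTok (t : String) : Bool :=
  !(t.toList.contains ' ') && ((t.toList.drop 1).dropLast.any (fun c => !pvIsWs c))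

-- the reachable slots of a rule (the i with is_nt(rule[i]) and fsym in reachable[rule[i]])
def pvPosPre (rule : List String) (fsym : String) (reachable : List (String × List String)) : List Int :=
  ((PySem.List.enumerate rule).filter
    (fun it => pvIsNt it.2 && ((PySem.Dict.mk reachable).getD it.2 []).contains fsym)).map (·.1)

-- Pre_ = exactly where Python A returns normally: every key has at least one rule (A's
-- 'assert rules'), every nonterminal token of a used rule has a reachability entry (A's
-- KeyError), and every nonterminal token that actually gets negated — an NT at slot i of a
-- rule that has some reachable slot other than i — must be negatable (space-free with a
-- non-blank stem, else negate_base_key's asserts / stem's ValueError) with a space-free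
-- negation refinement (negate_prefix's assert).  B raises on exactly the same inputs.
def Pre_remove_all_faults_except_one_from_grammar (grammar : List (String × List (List String))) (fsym : String) (prefix_f : String) (reachable : List (String × List String)) : Prop :=
  ∀ kv ∈ grammar,
    ((PySem.Dict.mk grammar).getD kv.1 [] ≠ []) ∧
    ∀ rule ∈ (PySem.Dict.mk grammar).getD kv.1 ([] : List (List String)),
      (∀ t ∈ rule, pvIsNt t → (PySem.Dict.mk reachable).contains t) ∧
      (∀ it ∈ PySem.List.enumerate rule,
        pvIsNt it.2 →
        (∃ p ∈ pvPosPre rule fsym reachable, p ≠ it.1) →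
        (¬ (pvRefinement (pvToFkeyPrefix fsym prefix_f .atleast)).toList.contains ' ') ∧ pvGoodTok it.2)

instance (grammar : List (String × List (List String))) (fsym : String) (prefix_f : String) (reachable : List (String × List String)) : Decidable (Pre_remove_all_faults_except_one_from_grammar grammar fsym prefix_f reachable) := by unfold Pre_remove_all_faults_except_one_from_grammar; infer_instance

def pvWitness_remove_all_faults_except_one_from_grammar : (List (String × List (List String))) × String × String × (List (String × List String)) :=
  ([("<a>", [["<a>", "x"]])], "<a>", "p", [("<a>", ["<a>"])])

def Spec_remove_all_faults_except_one_from_grammar (grammar : List (String × List (List String))) (fsym : String) (prefix_f : String) (reachable : List (String × List String)) (out : List (String × List (List String))) : Prop := out = remove_all_faults_except_one_from_grammar_alt grammar fsym prefix_f reachable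
instance (grammar : List (String × List (List String))) (fsym : String) (prefix_f : String) (reachable : List (String × List String)) (out : List (String × List (List String))) : Decidable (Spec_remove_all_faults_except_one_from_grammar grammar fsym prefix_f reachable out) := by unfold Spec_remove_all_faults_except_one_from_grammar; infer_instance

-- ===== CLAIM (what is proved, stated in full; the proofs are below) =====
def Claim_equal_remove_all_faults_except_one_from_grammar : Prop := ∀ (grammar : List (String × List (List String))) (fsym : String) (prefix_f : String) (reachable : List (String × List String)), Dom_remove_all_faults_except_one_from_grammar grammar fsym prefix_f reachable → Pre_remove_all_faults_except_one_from_grammar grammar fsym prefix_f reachable → Spec_remove_all_faults_except_one_from_grammar grammar fsym prefix_f reachable (remove_all_faults_except_one_from_grammar grammar fsym prefix_f reachable)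

-- ===== LEMMAS AND PROOFS =====

-- the witness satisfies Dom and Pre
theorem pvWitness_ok :
    Dom_remove_all_faults_except_one_from_grammar (pvWitness_remove_all_faults_except_one_from_grammar.1) (pvWitness_remove_all_faults_except_one_from_grammar.2.1) (pvWitness_remove_all_faults_except_one_from_grammar.2.2.1) (pvWitness_remove_all_faults_except_one_from_grammar.2.2.2) ∧
    Pre_remove_all_faults_except_one_from_grammar (pvWitness_remove_all_faults_except_one_from_grammar.1) (pvWitness_remove_all_faults_except_one_from_grammar.2.1) (pvWitness_remove_all_faults_except_one_from_grammar.2.2.1) (pvWitness_remove_all_faults_except_one_from_grammar.2.2.2) := by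
  constructor <;> decide

-- A's append-loop over enumerate computes the filter/map positions list
theorem pvPositions_eq (rule : List String) (fkey : String) (reachable : List (String × List String)) :
    pvGetReachablePositions rule fkey reachable = pvPosPre rule fkey reachable := by
  unfold pvGetReachablePositions pvPosPre
  have h : ∀ (acc : List Int) (it : Int × String),
      (if pvIsNt it.2 then
        (if ((PySem.Dict.mk reachable).getD it.2 []).contains fkey then acc ++ [it.1] else acc)
      else acc) =
      (if (pvIsNt it.2 && ((PySem.Dict.mk reachable).getD it.2 []).contains fkey) then acc ++ [it.1] else acc) := by
    intro acc it
    simp only [Bool.and_eq_true]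
    split_ifs <;> first | rfl | tauto
  simp only [h]
  exact PySem.List.foldl_append_if
    (fun (it : Int × String) => pvIsNt it.2 && ((PySem.Dict.mk reachable).getD it.2 []).contains fkey)
    (fun (it : Int × String) => it.1) (PySem.List.enumerate rule) []

-- the positions list of a rule, from an arbitrary enumerate start (for the induction)
def pvPosB (fsym : String) (reachable : List (String × List String)) (l : List String) (s : Int) : List Int :=
  ((PySem.List.enumerate l s).filter
    (fun it => pvIsNt it.2 && ((PySem.Dict.mk reachable).getD it.2 []).contains fsym)).map (·.1)

theorem pvPosPre_eq_pvPosB (rule : List String) (fsym : String) (reachable : List (String × List String)) :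
    pvPosPre rule fsym reachable = pvPosB fsym reachable rule 0 := rfl

-- every member of the positions list started at s is s + (a valid Nat index)
theorem pvPosB_mem (fsym : String) (reachable : List (String × List String)) (l : List String) (s : Int)
    (pos : Int) (hmem : pos ∈ pvPosB fsym reachable l s) :
    ∃ k : Nat, k < l.length ∧ pos = s + (k : Int) := by
  unfold pvPosB at hmem
  simp only [List.mem_map, List.mem_filter] at hmem
  obtain ⟨it, ⟨hit, -⟩, hfst⟩ := hmem
  rw [PySem.List.mem_enumerate_iff] at hit
  obtain ⟨k, hk, rfl⟩ := hit
  exact ⟨k, hk, by simpa using hfst.symm⟩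

-- when pos is below every enumerate index, the ternary map is the uniform map
theorem pvMapNone (f g : String → String) :
    ∀ (l : List String) (s pos : Int), pos < s →
    (PySem.List.enumerate l s).map (fun pt => if pos = pt.1 then f pt.2 else g pt.2) = l.map g := by
  intro l
  induction l with
  | nil => intro s pos _; simp [PySem.List.enumerate_nil]
  | cons x xs ih =>
    intro s pos hlt
    rw [PySem.List.enumerate_cons]
    simp only [List.map_cons]
    rw [if_neg (by omega), ih (s + 1) pos (by omega)]

-- B's one-hole recursion computes A's per-position ternary comprehensions, in position order
theorem pvVariants_eq (fsym pfx ref : String) (reachable : List (String × List String)) :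
    ∀ (l : List String) (s : Int),
    pvVariants fsym pfx ref reachable l =
      (pvPosB fsym reachable l s).map (fun pos =>
        (PySem.List.enumerate l s).map (fun pt =>
          if pos = pt.1 then pvToFkeyPrefix pt.2 pfx .atmost else pvNeg ref pt.2)) := by
  intro l
  induction l with
  | nil => intro s; simp [pvVariants, pvPosB, PySem.List.enumerate_nil]
  | cons t rest ih =>
    intro s
    have hpos : pvPosB fsym reachable (t :: rest) s =
        (if pvIsNt t && ((PySem.Dict.mk reachable).getD t []).contains fsym then [s] else []) ++
          pvPosB fsym reachable rest (s + 1) := by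
      unfold pvPosB
      rw [PySem.List.enumerate_cons, List.filter_cons]
      split_ifs <;> simp
    have htail : (pvPosB fsym reachable rest (s + 1)).map (fun pos =>
        (PySem.List.enumerate (t :: rest) s).map (fun pt =>
          if pos = pt.1 then pvToFkeyPrefix pt.2 pfx .atmost else pvNeg ref pt.2)) =
        (pvVariants fsym pfx ref reachable rest).map (fun v => pvNeg ref t :: v) := by
      rw [ih (s + 1), List.map_map]
      apply List.map_congr_left
      intro pos hpos'
      obtain ⟨k, -, rfl⟩ := pvPosB_mem fsym reachable rest (s + 1) pos hpos'
      rw [PySem.List.enumerate_cons]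
      simp only [Function.comp_apply, List.map_cons]
      rw [if_neg (by omega)]
    have hhead : (PySem.List.enumerate (t :: rest) s).map (fun pt =>
        if s = pt.1 then pvToFkeyPrefix pt.2 pfx .atmost else pvNeg ref pt.2) =
        pvToFkeyPrefix t pfx .atmost :: rest.map (pvNeg ref) := by
      rw [PySem.List.enumerate_cons]
      simp only [List.map_cons]
      rw [pvMapNone (fun u => pvToFkeyPrefix u pfx .atmost) (pvNeg ref) rest (s + 1) s (by omega)]
      simp
    show (if pvIsNt t && ((PySem.Dict.mk reachable).getD t []).contains fsym then
            (pvToFkeyPrefix t pfx .atmost :: rest.map (pvNeg ref)) ::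
              (pvVariants fsym pfx ref reachable rest).map (fun v => pvNeg ref t :: v)
          else (pvVariants fsym pfx ref reachable rest).map (fun v => pvNeg ref t :: v)) = _
    rw [hpos]
    split_ifs with h
    · simp only [List.map_cons, List.singleton_append]
      rw [hhead, htail]
    · simp only [List.nil_append]
      rw [htail]

-- setdefault is A's 'if fk not in d: d[fk] = []'
theorem pvSetdefault_eq {κ ν : Type} [BEq κ] (d : PySem.Dict κ ν) (k : κ) (v : ν) :
    d.setdefault k v = if d.contains k then d else d.insert k v := by
  by_cases h : d.contains k <;> simp [PySem.Dict.setdefault, PySem.Dict.insert, h]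

-- the two ports agree on every input
theorem pvPorts_eq (grammar : List (String × List (List String))) (fsym prefix_f : String) (reachable : List (String × List String)) :
    remove_all_faults_except_one_from_grammar grammar fsym prefix_f reachable =
    remove_all_faults_except_one_from_grammar_alt grammar fsym prefix_f reachable := by
  unfold remove_all_faults_except_one_from_grammar remove_all_faults_except_one_from_grammar_alt
  apply congrArg PySem.Dict.items
  apply congrArg (fun f => List.foldl f (PySem.Dict.mk []) grammar)
  funext ng kv
  simp only [pvRemoveKey]
  rw [pvSetdefault_eq]
  have hrule : ∀ rule : List String,
      (if (pvGetReachablePositions rule fsym reachable).isEmpty then [rule]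
       else (pvGetReachablePositions rule fsym reachable).map (fun pos =>
        (PySem.List.enumerate rule).map (fun pt =>
          if pos = pt.1 then pvToFkeyPrefix pt.2 prefix_f .atmost
          else (if pvIsNt pt.2 then pvNegateBaseKey pt.2 (pvRefinement (pvToFkeyPrefix fsym prefix_f .atleast)) else pt.2)))) =
      (if (pvVariants fsym prefix_f (pvRefinement (pvToFkeyPrefix fsym prefix_f .atleast)) reachable rule).isEmpty then [rule]
       else pvVariants fsym prefix_f (pvRefinement (pvToFkeyPrefix fsym prefix_f .atleast)) reachable rule) := by
    intro rule
    have hv := pvVariants_eq fsym prefix_f (pvRefinement (pvToFkeyPrefix fsym prefix_f .atleast)) reachable rule 0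
    rw [hv, ← pvPosPre_eq_pvPosB, ← pvPositions_eq]
    simp only [List.isEmpty_map]
    rfl
  have hfold : ∀ rules : List (List String),
      List.foldl (fun (acc : List (List String)) (rule : List String) =>
        if (pvGetReachablePositions rule fsym reachable).isEmpty then acc ++ [rule]
        else acc ++ (pvGetReachablePositions rule fsym reachable).map (fun pos =>
          (PySem.List.enumerate rule).map (fun pt =>
            if pos = pt.1 then pvToFkeyPrefix pt.2 prefix_f .atmost
            else (if pvIsNt pt.2 then pvNegateBaseKey pt.2 (pvRefinement (pvToFkeyPrefix fsym prefix_f .atleast)) else pt.2)))) [] rules =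
      List.foldl (fun (acc : List (List String)) (rule : List String) =>
        acc ++ (if (pvVariants fsym prefix_f (pvRefinement (pvToFkeyPrefix fsym prefix_f .atleast)) reachable rule).isEmpty then [rule]
                else pvVariants fsym prefix_f (pvRefinement (pvToFkeyPrefix fsym prefix_f .atleast)) reachable rule)) [] rules := by
    intro rules
    apply congrFun
    apply congrArg (fun f => List.foldl f ([] : List (List String)))
    funext acc rule
    rw [← hrule rule]
    split_ifs <;> rfl
  rw [hfold]

-- ===== VERDICT (by name: the statement is the Claim_ definition above) =====
theorem remove_all_faults_except_one_from_grammar_spec : Claim_equal_remove_all_faults_except_one_from_grammar := by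
  intro grammar fsym prefix_f reachable _ _
  unfold Spec_remove_all_faults_except_one_from_grammar
  exact pvPorts_eq grammar fsym prefix_f reachable
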